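-- pv_equiv track=rewrite | github.com/rnevils/Minesweeper-solver | minesweeper.py | get_arcs
-- ===== SOURCE A (Python) =====
-- from typing import Dict, Generator, List, Optional, Set, Tuple
--
-- def get_arcs(var_map: Dict[int, List[Dict[int, bool]]]
--              ) -> Set[Tuple[int, int]]:
--     arcs = set()
--
--     for key, item in var_map.items():
--         for key2, item2 in var_map.items():
--
--             # if the neighbors have ANY in common, add those to the arcs
--             if (
--                 not set(item[0].keys()).isdisjoint(item2[0].keys())
--                 and key != key2
--             ):
--                 arcs.add((key, key2))
--
--     return arcs
-- ===== SOURCE B (Python) =====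
-- def get_arcs(var_map):
--     # inverted index: neighbor cell -> set of keys whose first dict mentions it
--     index = {}
--     for k, item in var_map.items():
--         for cell in item[0]:
--             index.setdefault(cell, set()).add(k)
--     # partners[k] = all keys sharing at least one neighbor cell with k
--     partners = {}
--     for group in index.values():
--         for k in group:
--             partners.setdefault(k, set()).update(group)
--     return {(k, k2) for k in var_map for k2 in var_map
--             if k != k2 and k2 in partners.get(k, set())}
-- ===== Notes on version B (the rewrite author's own statement) =====
-- stated objective: alternative
-- what changed: Instead of testing every ordered pair of keys with a fresh neighbor-set intersection, B builds an inverted index (neighbor cell -> set of keys) in one pass and precomputes each key's partner set from the index groups, so the pair loop is a plain set-membership test with no per-pair intersection work (trades O(n^2*m) intersections for index/partner precomputation).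
import Mathlib
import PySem

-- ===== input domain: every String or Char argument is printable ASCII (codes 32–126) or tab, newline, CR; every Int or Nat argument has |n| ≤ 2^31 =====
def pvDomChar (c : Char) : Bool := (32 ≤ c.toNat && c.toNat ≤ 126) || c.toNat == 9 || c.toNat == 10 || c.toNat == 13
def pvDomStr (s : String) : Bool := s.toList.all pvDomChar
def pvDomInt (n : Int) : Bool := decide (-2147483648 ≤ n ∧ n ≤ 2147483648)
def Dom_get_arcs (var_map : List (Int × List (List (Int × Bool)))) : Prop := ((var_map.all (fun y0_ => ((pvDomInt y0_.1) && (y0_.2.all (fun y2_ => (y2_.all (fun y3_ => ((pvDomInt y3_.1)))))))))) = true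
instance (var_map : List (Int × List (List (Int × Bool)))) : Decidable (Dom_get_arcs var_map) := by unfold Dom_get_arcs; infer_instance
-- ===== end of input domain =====

-- B replaces A's all-pairs neighbour-set intersection test by an inverted index
-- (neighbour cell -> keys), from which each key's partner set is precomputed once.

-- the unique keys of the first dict of an entry's list, in first-occurrence order
-- (Python: the keys of item[0]; `.getD []` is only reached outside Pre_, where item = [])
def pvCells (item : List (List (Int × Bool))) : PySem.Set Int :=
  PySem.Set.ofList (((PySem.List.pyGet? item 0).getD []).map Prod.fst)

-- ===== PORT A =====
def get_arcs (var_map : List (Int × List (List (Int × Bool)))) : List (Int × Int) :=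
  var_map.foldl (fun arcs kv =>
    var_map.foldl (fun arcs kv2 =>
      if !(PySem.Set.isdisjoint (pvCells kv.2) (pvCells kv2.2)) && kv.1 != kv2.1
      then PySem.Set.add arcs (kv.1, kv2.1) else arcs) arcs) PySem.Set.empty

-- ===== PORT B =====
def get_arcs_alt (var_map : List (Int × List (List (Int × Bool)))) : List (Int × Int) :=
  -- index = {}; for k, item in var_map.items(): for cell in item[0]: index.setdefault(cell, set()).add(k)
  let index : PySem.Dict Int (PySem.Set Int) :=
    var_map.foldl (fun idx kv =>
      (pvCells kv.2).foldl (fun idx c =>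
        idx.insert c (PySem.Set.add (idx.getD c PySem.Set.empty) kv.1)) idx) PySem.Dict.empty
  -- partners = {}; for group in index.values(): for k in group: partners.setdefault(k, set()).update(group)
  let partners : PySem.Dict Int (PySem.Set Int) :=
    index.values.foldl (fun p g =>
      g.foldl (fun p k => p.insert k (PySem.Set.update (p.getD k PySem.Set.empty) g)) p) PySem.Dict.empty
  -- {(k, k2) for k in var_map for k2 in var_map if k != k2 and k2 in partners.get(k, set())}
  (var_map.map Prod.fst).foldl (fun acc k =>
    (var_map.map Prod.fst).foldl (fun acc k2 =>
      if k != k2 && PySem.Set.contains (partners.getD k PySem.Set.empty) k2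
      then PySem.Set.add acc (k, k2) else acc) acc) PySem.Set.empty

-- ===== PRECONDITION & SPEC =====
-- Pre_ excludes association lists with duplicate keys (they do not denote a Python dict:
-- the dict collapses them, so both Pythons see a smaller dict than the list ports), and
-- entries whose list of neighbour dicts is empty (item[0] raises IndexError in A and in B).
def Pre_get_arcs (var_map : List (Int × List (List (Int × Bool)))) : Prop :=
  (var_map.map Prod.fst).Nodup ∧ ∀ kv ∈ var_map, kv.2 ≠ []

instance (var_map : List (Int × List (List (Int × Bool)))) : Decidable (Pre_get_arcs var_map) := by
  unfold Pre_get_arcs; infer_instance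

def pvWitness_get_arcs : (List (Int × List (List (Int × Bool)))) :=
  [(0, [[(5, true)]]), (1, [[(5, false), (7, true)]]), (2, [[(9, true)]])]

def Spec_get_arcs (var_map : List (Int × List (List (Int × Bool)))) (out : List (Int × Int)) : Prop := out = get_arcs_alt var_map
instance (var_map : List (Int × List (List (Int × Bool)))) (out : List (Int × Int)) : Decidable (Spec_get_arcs var_map out) := by unfold Spec_get_arcs; infer_instance

-- ===== CLAIM (what is proved, stated in full; the proofs are below) =====
def Claim_equal_get_arcs : Prop := ∀ (var_map : List (Int × List (List (Int × Bool)))), Dom_get_arcs var_map → Pre_get_arcs var_map → Spec_get_arcs var_map (get_arcs var_map)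

-- ===== LEMMAS AND PROOFS =====

theorem pv_foldl_add_if {α β : Type} [BEq β] (l : List α) (p : α → Bool) (f : α → β) (s : PySem.Set β) :
    l.foldl (fun s x => if p x then PySem.Set.add s (f x) else s) s
      = ((l.filter p).map f).foldl PySem.Set.add s := by
  induction l generalizing s with
  | nil => rfl
  | cons a l ih =>
    by_cases h : p a <;> simp [h, ih]

theorem pv_foldl_flat {α β γ : Type} (l : List α) (g : α → List β) (h : γ → β → γ) (s : γ) :
    l.foldl (fun s x => (g x).foldl h s) s = (l.flatMap g).foldl h s := by
  induction l generalizing s with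
  | nil => rfl
  | cons a l ih => simp [List.flatMap_cons, List.foldl_append, ih]

theorem get_arcs_eq_ofList (var_map : List (Int × List (List (Int × Bool)))) :
    get_arcs var_map = PySem.Set.ofList (var_map.flatMap (fun kv =>
      ((var_map.filter (fun kv2 =>
          !(PySem.Set.isdisjoint (pvCells kv.2) (pvCells kv2.2)) && kv.1 != kv2.1)).map
        (fun kv2 => (kv.1, kv2.1))))) := by
  unfold get_arcs
  rw [PySem.Set.ofList_eq_foldl, ← pv_foldl_flat]
  simp only [pv_foldl_add_if]
  rfl

-- inner loop of the inverted-index construction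
theorem pv_mem_index_inner (cl : List Int) (k0 : Int) (idx : PySem.Dict Int (PySem.Set Int))
    (c k : Int) :
    k ∈ ((cl.foldl (fun idx c =>
        idx.insert c (PySem.Set.add (idx.getD c PySem.Set.empty) k0)) idx).getD c PySem.Set.empty)
      ↔ k ∈ idx.getD c PySem.Set.empty ∨ (c ∈ cl ∧ k = k0) := by
  induction cl generalizing idx with
  | nil => simp
  | cons c0 cl ih =>
    simp only [List.foldl_cons, ih, PySem.Dict.getD_insert]
    by_cases h : c = c0
    · subst h; simp [PySem.Set.mem_add]; try tauto
    · simp [h]; try tauto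

theorem pv_mem_index (l : List (Int × List (List (Int × Bool))))
    (idx : PySem.Dict Int (PySem.Set Int)) (c k : Int) :
    k ∈ ((l.foldl (fun idx kv =>
        (pvCells kv.2).foldl (fun idx c =>
          idx.insert c (PySem.Set.add (idx.getD c PySem.Set.empty) kv.1)) idx) idx).getD c PySem.Set.empty)
      ↔ k ∈ idx.getD c PySem.Set.empty ∨ ∃ kv ∈ l, kv.1 = k ∧ c ∈ pvCells kv.2 := by
  induction l generalizing idx with
  | nil => simp
  | cons a l ih =>
    simp only [List.foldl_cons, ih, pv_mem_index_inner]
    constructor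
    · rintro ((h | ⟨hc, rfl⟩) | ⟨kv, hm, hk, hc⟩)
      · exact Or.inl h
      · exact Or.inr ⟨a, List.mem_cons_self .., rfl, hc⟩
      · exact Or.inr ⟨kv, List.mem_cons_of_mem _ hm, hk, hc⟩
    · rintro (h | ⟨kv, hm, hk, hc⟩)
      · exact Or.inl (Or.inl h)
      · rcases List.mem_cons.mp hm with rfl | hm
        · exact Or.inl (Or.inr ⟨hc, hk.symm⟩)
        · exact Or.inr ⟨kv, hm, hk, hc⟩

-- inner loop of the partner-set construction
theorem pv_mem_partners_inner (l g : List Int) (d : PySem.Dict Int (PySem.Set Int)) (k x : Int) :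
    x ∈ ((l.foldl (fun p k =>
        p.insert k (PySem.Set.update (p.getD k PySem.Set.empty) g)) d).getD k PySem.Set.empty)
      ↔ x ∈ d.getD k PySem.Set.empty ∨ (k ∈ l ∧ x ∈ g) := by
  induction l generalizing d with
  | nil => simp
  | cons k0 l ih =>
    simp only [List.foldl_cons, ih, PySem.Dict.getD_insert]
    by_cases h : k = k0
    · subst h; simp [PySem.Set.mem_update]; try tauto
    · simp [h]; try tauto

theorem pv_mem_partners (groups : List (PySem.Set Int)) (d : PySem.Dict Int (PySem.Set Int))
    (k x : Int) :
    x ∈ ((groups.foldl (fun p g =>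
        g.foldl (fun p k => p.insert k (PySem.Set.update (p.getD k PySem.Set.empty) g)) p) d).getD k PySem.Set.empty)
      ↔ x ∈ d.getD k PySem.Set.empty ∨ ∃ g ∈ groups, k ∈ g ∧ x ∈ g := by
  induction groups generalizing d with
  | nil => simp
  | cons g groups ih =>
    simp only [List.foldl_cons, ih, pv_mem_partners_inner]
    constructor
    · rintro ((h | ⟨hk, hx⟩) | ⟨g', hm, hk, hx⟩)
      · exact Or.inl h
      · exact Or.inr ⟨g, List.mem_cons_self .., hk, hx⟩
      · exact Or.inr ⟨g', List.mem_cons_of_mem _ hm, hk, hx⟩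
    · rintro (h | ⟨g', hm, hk, hx⟩)
      · exact Or.inl (Or.inl h)
      · rcases List.mem_cons.mp hm with rfl | hm
        · exact Or.inl (Or.inr ⟨hk, hx⟩)
        · exact Or.inr ⟨g', hm, hk, hx⟩

-- the index built by B has Nodup keys
theorem pv_index_nodup_keys (l : List (Int × List (List (Int × Bool))))
    (idx : PySem.Dict Int (PySem.Set Int)) (h : idx.keys.Nodup) :
    ((l.foldl (fun idx kv =>
        (pvCells kv.2).foldl (fun idx c =>
          idx.insert c (PySem.Set.add (idx.getD c PySem.Set.empty) kv.1)) idx) idx).keys).Nodup := by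
  induction l generalizing idx with
  | nil => exact h
  | cons a l ih =>
    exact ih _ (PySem.Dict.nodup_keys_foldl_insert _ _ _ h)

-- membership in some value-set of a Nodup-keys dict = membership via some getD
theorem pv_exists_value {d : PySem.Dict Int (PySem.Set Int)} (hnd : d.keys.Nodup) (k x : Int) :
    (∃ g ∈ d.values, k ∈ g ∧ x ∈ g) ↔ ∃ c, k ∈ d.getD c PySem.Set.empty ∧ x ∈ d.getD c PySem.Set.empty := by
  rw [PySem.Dict.values_eq_map_keys d hnd PySem.Set.empty]
  constructor
  · rintro ⟨g, hg, hk, hx⟩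
    rcases List.mem_map.mp hg with ⟨c, _, rfl⟩
    exact ⟨c, hk, hx⟩
  · rintro ⟨c, hk, hx⟩
    by_cases hc : d.contains c
    · exact ⟨d.getD c PySem.Set.empty,
        List.mem_map.mpr ⟨c, (PySem.Dict.contains_iff_mem_keys d c).mp hc, rfl⟩, hk, hx⟩
    · rw [PySem.Dict.getD_of_not_contains d PySem.Set.empty (by simpa using hc)] at hk
      simp [PySem.Set.empty] at hk

-- the partner-set membership is exactly "shares a neighbour cell", given Nodup keys
theorem pv_partner_char (var_map : List (Int × List (List (Int × Bool))))
    (hnd : (var_map.map Prod.fst).Nodup)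
    (kv kv2 : Int × List (List (Int × Bool))) (h1 : kv ∈ var_map) (h2 : kv2 ∈ var_map) :
    (kv2.1 ∈ (((var_map.foldl (fun idx kv =>
          (pvCells kv.2).foldl (fun idx c =>
            idx.insert c (PySem.Set.add (idx.getD c PySem.Set.empty) kv.1)) idx)
          (PySem.Dict.empty : PySem.Dict Int (PySem.Set Int))).values.foldl (fun p g =>
        g.foldl (fun p k => p.insert k (PySem.Set.update (p.getD k PySem.Set.empty) g)) p)
        (PySem.Dict.empty : PySem.Dict Int (PySem.Set Int))).getD kv.1 PySem.Set.empty))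
      ↔ ∃ c, c ∈ pvCells kv.2 ∧ c ∈ pvCells kv2.2 := by
  set idx := var_map.foldl (fun idx kv =>
      (pvCells kv.2).foldl (fun idx c =>
        idx.insert c (PySem.Set.add (idx.getD c PySem.Set.empty) kv.1)) idx)
      (PySem.Dict.empty : PySem.Dict Int (PySem.Set Int)) with hidx
  have hkeys : idx.keys.Nodup := by
    rw [hidx]; exact pv_index_nodup_keys _ _ PySem.Dict.nodup_keys_empty
  rw [pv_mem_partners, pv_exists_value hkeys]
  have hmem : ∀ c k, k ∈ idx.getD c PySem.Set.empty ↔ ∃ kv' ∈ var_map, kv'.1 = k ∧ c ∈ pvCells kv'.2 := by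
    intro c k
    rw [hidx, pv_mem_index]
    simp [PySem.Set.empty]
  have huniq : ∀ (a b : Int × List (List (Int × Bool))), a ∈ var_map → b ∈ var_map → a.1 = b.1 → a = b := by
    intro a b ha hb hab
    exact List.inj_on_of_nodup_map hnd ha hb hab
  constructor
  · rintro (h | ⟨c, hk, hx⟩)
    · simp [PySem.Set.empty, PySem.Dict.getD_empty] at h
    · rw [hmem] at hk hx
      rcases hk with ⟨a, ha, ha1, hac⟩
      rcases hx with ⟨b, hb, hb1, hbc⟩
      have : a = kv := huniq a kv ha h1 (by rw [ha1])
      have hb' : b = kv2 := huniq b kv2 hb h2 (by rw [hb1])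
      subst this; subst hb'
      exact ⟨c, hac, hbc⟩
  · rintro ⟨c, h1c, h2c⟩
    refine Or.inr ⟨c, ?_, ?_⟩
    · exact (hmem c kv.1).mpr ⟨kv, h1, rfl, h1c⟩
    · exact (hmem c kv2.1).mpr ⟨kv2, h2, rfl, h2c⟩

theorem pv_not_disjoint (s t : PySem.Set Int) :
    (!(PySem.Set.isdisjoint s t)) = true ↔ ∃ c, c ∈ s ∧ c ∈ t := by
  rw [Bool.not_eq_eq_eq_not, Bool.not_true, ← Bool.not_eq_true, PySem.Set.isdisjoint_iff]
  simp

theorem get_arcs_alt_eq_ofList (var_map : List (Int × List (List (Int × Bool))))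
    (hnd : (var_map.map Prod.fst).Nodup) :
    get_arcs_alt var_map = PySem.Set.ofList (var_map.flatMap (fun kv =>
      ((var_map.filter (fun kv2 =>
          !(PySem.Set.isdisjoint (pvCells kv.2) (pvCells kv2.2)) && kv.1 != kv2.1)).map
        (fun kv2 => (kv.1, kv2.1))))) := by
  unfold get_arcs_alt
  rw [PySem.Set.ofList_eq_foldl, ← pv_foldl_flat]
  simp only [pv_foldl_add_if]
  rw [List.foldl_map]
  apply PySem.List.foldl_congr_mem
  intro s kv hkv
  rw [List.filter_map, List.foldl_map, List.foldl_map, List.foldl_map]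
  refine congrArg _ (List.filter_congr ?_)
  intro kv2 hkv2
  simp only [Function.comp_apply]
  by_cases hne : kv.1 = kv2.1
  · simp [hne]
  · have hcontains := pv_partner_char var_map hnd kv kv2 hkv hkv2
    by_cases hd : ∃ c, c ∈ pvCells kv.2 ∧ c ∈ pvCells kv2.2
    · have h1 : (((((var_map.foldl (fun idx kv =>
            (pvCells kv.2).foldl (fun idx c =>
              idx.insert c (PySem.Set.add (idx.getD c PySem.Set.empty) kv.1)) idx)
            (PySem.Dict.empty : PySem.Dict Int (PySem.Set Int))).values.foldl (fun p g =>
          g.foldl (fun p k => p.insert k (PySem.Set.update (p.getD k PySem.Set.empty) g)) p)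
          (PySem.Dict.empty : PySem.Dict Int (PySem.Set Int))).getD kv.1 PySem.Set.empty)).contains kv2.1) = true := by
        rw [PySem.Set.contains_iff]; exact hcontains.mpr hd
      have h2 := (pv_not_disjoint (pvCells kv.2) (pvCells kv2.2)).mpr hd
      have hb : (kv.1 != kv2.1) = true := by simp [hne]
      rw [h1, h2, hb]
    · have h1 : (((((var_map.foldl (fun idx kv =>
            (pvCells kv.2).foldl (fun idx c =>
              idx.insert c (PySem.Set.add (idx.getD c PySem.Set.empty) kv.1)) idx)
            (PySem.Dict.empty : PySem.Dict Int (PySem.Set Int))).values.foldl (fun p g =>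
          g.foldl (fun p k => p.insert k (PySem.Set.update (p.getD k PySem.Set.empty) g)) p)
          (PySem.Dict.empty : PySem.Dict Int (PySem.Set Int))).getD kv.1 PySem.Set.empty)).contains kv2.1) = false := by
        rw [← Bool.not_eq_true, PySem.Set.contains_iff]
        intro hmem; exact hd (hcontains.mp hmem)
      have h2 : (!(PySem.Set.isdisjoint (pvCells kv.2) (pvCells kv2.2))) = false := by
        rw [← Bool.not_eq_true, pv_not_disjoint]; exact hd
      rw [h1, h2]
      simp

-- ===== VERDICT (by name: the statement is the Claim_ definition above) =====
theorem get_arcs_spec : Claim_equal_get_arcs := by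
  intro var_map _ hpre
  unfold Spec_get_arcs
  rw [get_arcs_eq_ofList, get_arcs_alt_eq_ofList var_map hpre.1]
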